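-- pv_equiv track=rewrite | github.com/YanshuHu/combinatorics-oj1 | permutations1.py | find_it_4
-- ===== SOURCE A (Python) =====
-- def find_it_4(new_list,index,value):
--     num = 0
--     for i in range(len(new_list)):
--         if new_list[i] == -1:
--             num+=1
--             if num == index+1:
--                 new_list[i] = value
--     return new_list
-- ===== SOURCE B (Python) =====
-- def find_it_4(new_list, index, value):
--     positions = [i for i, x in enumerate(new_list) if x == -1]
--     if 0 <= index < len(positions):
--         new_list[positions[index]] = value
--     return new_list
-- ===== Notes on version B (the rewrite author's own statement) =====
-- stated objective: simpler
-- what changed: Replaces the inline running-counter scan with building an index table of all -1 positions once, then a single guarded direct assignment at positions[index].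
import Mathlib
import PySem

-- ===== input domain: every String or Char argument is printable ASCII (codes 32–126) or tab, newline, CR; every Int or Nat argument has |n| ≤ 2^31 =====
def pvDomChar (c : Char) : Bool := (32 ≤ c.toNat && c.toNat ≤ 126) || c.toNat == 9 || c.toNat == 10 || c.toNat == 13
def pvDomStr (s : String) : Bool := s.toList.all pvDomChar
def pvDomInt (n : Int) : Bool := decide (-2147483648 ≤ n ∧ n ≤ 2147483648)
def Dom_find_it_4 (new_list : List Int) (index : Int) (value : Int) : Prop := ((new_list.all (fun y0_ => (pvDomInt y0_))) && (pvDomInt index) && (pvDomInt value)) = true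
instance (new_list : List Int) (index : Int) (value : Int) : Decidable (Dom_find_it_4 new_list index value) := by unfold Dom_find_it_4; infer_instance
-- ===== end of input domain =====

-- B replaces A's inline running-counter scan with an index table of -1 positions plus one guarded
-- direct assignment (objective: simpler). Like A, the Python B mutates new_list in place; the
-- equivalence proved here is about the return value (which both also return).


-- ===== PORT A =====
-- A's for-loop over range(len(new_list)) with the running counter num, as the obvious
-- structural recursion over the list carrying the same counter.
def find_it_4_go (l : List Int) (num : Int) (index : Int) (value : Int) : List Int :=
  match l with
  | [] => []
  | x :: xs =>
    if x = -1 then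
      (if num + 1 = index + 1 then value else x) :: find_it_4_go xs (num + 1) index value
    else
      x :: find_it_4_go xs num index value

def find_it_4 (new_list : List Int) (index : Int) (value : Int) : List Int :=
  find_it_4_go new_list 0 index value

-- ===== PORT B =====
-- positions = [i for i, x in enumerate(new_list) if x == -1]; guarded direct assignment.
def find_it_4_alt (new_list : List Int) (index : Int) (value : Int) : List Int :=
  let positions := ((PySem.List.enumerate new_list 0).filter (fun p => p.2 == -1)).map Prod.fst
  if 0 ≤ index ∧ index < positions.length then
    new_list.set (positions.getD index.toNat 0).toNat value
  else
    new_list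

-- ===== PRECONDITION & SPEC =====
def Spec_find_it_4 (new_list : List Int) (index : Int) (value : Int) (out : List Int) : Prop := out = find_it_4_alt new_list index value
instance (new_list : List Int) (index : Int) (value : Int) (out : List Int) : Decidable (Spec_find_it_4 new_list index value out) := by unfold Spec_find_it_4; infer_instance

-- ===== CLAIM (what is proved, stated in full; the proofs are below) =====
def Claim_equal_find_it_4 : Prop := ∀ (new_list : List Int) (index : Int) (value : Int), Dom_find_it_4 new_list index value → Spec_find_it_4 new_list index value (find_it_4 new_list index value)

-- ===== LEMMAS AND PROOFS =====

-- the index table of B, as a function of the list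
def pvPos (l : List Int) : List Int :=
  ((PySem.List.enumerate l 0).filter (fun p => p.2 == -1)).map Prod.fst

-- common characterisation: replace the k-th -1 (0-based) by v, no-op if k is out of range
def pvSetIth (l : List Int) (k : Int) (v : Int) : List Int :=
  match l with
  | [] => []
  | x :: xs =>
    if x = -1 then (if k = 0 then v else x) :: pvSetIth xs (k - 1) v
    else x :: pvSetIth xs k v

theorem pvGo_eq_setIth (l : List Int) (num index value : Int) :
    find_it_4_go l num index value = pvSetIth l (index - num) value := by
  induction l generalizing num with
  | nil => rfl
  | cons x xs ih =>
    simp only [find_it_4_go, pvSetIth]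
    by_cases hx : x = -1
    · rw [if_pos hx, if_pos hx, ih]
      have h2 : index - (num + 1) = index - num - 1 := by omega
      rw [h2]
      by_cases hni : num = index
      · rw [if_pos (by omega : num + 1 = index + 1), if_pos (by omega : index - num = 0)]
      · rw [if_neg (by omega : ¬ num + 1 = index + 1), if_neg (by omega : ¬ index - num = 0)]
    · rw [if_neg hx, if_neg hx, ih]

theorem pvEnumerate_shift (l : List Int) (s : Int) :
    PySem.List.enumerate l (s + 1) = (PySem.List.enumerate l s).map (fun p => (p.1 + 1, p.2)) := by
  induction l generalizing s with
  | nil => simp [PySem.List.enumerate_nil]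
  | cons x xs ih => simp [PySem.List.enumerate_cons, ih]

theorem pvPos_cons_hit (x : Int) (xs : List Int) (hx : x = -1) :
    pvPos (x :: xs) = (0 : Int) :: (pvPos xs).map (fun p => p + 1) := by
  simp only [pvPos, PySem.List.enumerate_cons]
  rw [show (0 : Int) + 1 = 0 + 1 from rfl, pvEnumerate_shift]
  simp [hx, List.filter_map, List.map_map, Function.comp_def]

theorem pvPos_cons_miss (x : Int) (xs : List Int) (hx : ¬ x = -1) :
    pvPos (x :: xs) = (pvPos xs).map (fun p => p + 1) := by
  simp only [pvPos, PySem.List.enumerate_cons]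
  rw [show (0 : Int) + 1 = 0 + 1 from rfl, pvEnumerate_shift]
  simp [hx, List.filter_map, List.map_map, Function.comp_def]

theorem pvPos_nonneg (l : List Int) : ∀ p ∈ pvPos l, 0 ≤ p := by
  induction l with
  | nil => simp [pvPos, PySem.List.enumerate_nil]
  | cons x xs ih =>
    intro p hp
    by_cases hx : x = -1
    · rw [pvPos_cons_hit x xs hx] at hp
      rcases List.mem_cons.mp hp with rfl | h
      · omega
      · rcases List.mem_map.mp h with ⟨q, hq, rfl⟩
        have := ih q hq; omega
    · rw [pvPos_cons_miss x xs hx] at hp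
      rcases List.mem_map.mp hp with ⟨q, hq, rfl⟩
      have := ih q hq; omega

theorem pvSetIth_neg (l : List Int) (k v : Int) (hk : k < 0) : pvSetIth l k v = l := by
  induction l generalizing k with
  | nil => rfl
  | cons x xs ih =>
    simp only [pvSetIth]
    by_cases hx : x = -1
    · rw [if_pos hx, if_neg (by omega : ¬ k = 0), ih _ (by omega : k - 1 < 0)]
    · rw [if_neg hx, ih _ hk]

theorem pvGetD_map_succ (ps : List Int) (k : Nat) (hk : k < ps.length) :
    (ps.map (fun p => p + 1)).getD k 0 = ps.getD k 0 + 1 := by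
  rw [List.getD_eq_getElem?_getD, List.getD_eq_getElem?_getD,
    List.getElem?_map, List.getElem?_eq_getElem hk]
  simp

theorem pvGetD_nonneg (ps : List Int) (k : Nat) (hk : k < ps.length)
    (h : ∀ p ∈ ps, 0 ≤ p) : 0 ≤ ps.getD k 0 := by
  rw [List.getD_eq_getElem?_getD, List.getElem?_eq_getElem hk]
  exact h _ (List.getElem_mem hk)

theorem pvSetIth_key (l : List Int) (k : Nat) (v : Int) :
    (k < (pvPos l).length → pvSetIth l (k : Int) v = l.set ((pvPos l).getD k 0).toNat v) ∧
    ((pvPos l).length ≤ k → pvSetIth l (k : Int) v = l) := by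
  induction l generalizing k with
  | nil => exact ⟨fun h => by simp [pvPos, PySem.List.enumerate_nil] at h, fun _ => rfl⟩
  | cons x xs ih =>
    by_cases hx : x = -1
    · rw [pvPos_cons_hit x xs hx]
      constructor
      · intro hk
        match k with
        | 0 =>
          simp only [pvSetIth]
          rw [if_pos hx, if_pos (by norm_num), pvSetIth_neg xs _ v (by norm_num)]
          simp
        | Nat.succ k' =>
          simp only [List.length_cons, List.length_map] at hk
          have hk' : k' < (pvPos xs).length := by omega
          simp only [pvSetIth]
          rw [if_pos hx, if_neg (by push_cast; omega : ¬ ((k' + 1 : Nat) : Int) = 0),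
            show ((k' + 1 : Nat) : Int) - 1 = (k' : Int) by push_cast; omega,
            (ih k').1 hk']
          rw [List.getD_cons_succ, pvGetD_map_succ _ _ hk']
          have hnn : 0 ≤ (pvPos xs).getD k' 0 := pvGetD_nonneg _ _ hk' (pvPos_nonneg xs)
          rw [show ((pvPos xs).getD k' 0 + 1).toNat = ((pvPos xs).getD k' 0).toNat + 1 by omega,
            List.set_cons_succ]
      · intro hk
        simp only [List.length_cons, List.length_map] at hk
        match k with
        | 0 => omega
        | Nat.succ k' =>
          simp only [pvSetIth]
          rw [if_pos hx, if_neg (by push_cast; omega : ¬ ((k' + 1 : Nat) : Int) = 0),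
            show ((k' + 1 : Nat) : Int) - 1 = (k' : Int) by push_cast; omega,
            (ih k').2 (by omega)]
    · rw [pvPos_cons_miss x xs hx]
      constructor
      · intro hk
        simp only [List.length_map] at hk
        simp only [pvSetIth]
        rw [if_neg hx, (ih k).1 hk, pvGetD_map_succ _ _ hk]
        have hnn : 0 ≤ (pvPos xs).getD k 0 := pvGetD_nonneg _ _ hk (pvPos_nonneg xs)
        rw [show ((pvPos xs).getD k 0 + 1).toNat = ((pvPos xs).getD k 0).toNat + 1 by omega,
          List.set_cons_succ]
      · intro hk
        simp only [List.length_map] at hk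
        simp only [pvSetIth]
        rw [if_neg hx, (ih k).2 hk]

-- ===== VERDICT (by name: the statement is the Claim_ definition above) =====
theorem find_it_4_spec : Claim_equal_find_it_4 := by
  intro new_list index value _
  unfold Spec_find_it_4 find_it_4 find_it_4_alt
  rw [pvGo_eq_setIth]
  simp only [sub_zero]
  show pvSetIth new_list index value =
    if 0 ≤ index ∧ index < (pvPos new_list).length then
      new_list.set ((pvPos new_list).getD index.toNat 0).toNat value
    else new_list
  split_ifs with h
  · obtain ⟨h0, hlt⟩ := h
    have hk : (index.toNat : Int) = index := Int.toNat_of_nonneg h0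
    have hlt' : index.toNat < (pvPos new_list).length := by omega
    have := (pvSetIth_key new_list index.toNat value).1 hlt'
    rw [hk] at this
    exact this
  · by_cases h0 : 0 ≤ index
    · have hge : (pvPos new_list).length ≤ index.toNat := by
        rcases not_and_or.mp h with h' | h' <;> omega
      have := (pvSetIth_key new_list index.toNat value).2 hge
      rw [Int.toNat_of_nonneg h0] at this
      exact this
    · exact pvSetIth_neg _ _ _ (by omega)
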